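-- pv_equiv track=rewrite | github.com/wukong930/Zeus | backend/app/services/alert_agent/router.py | symbol_sector
-- ===== SOURCE A (Python) =====
-- def symbol_sector(symbol: str) -> str:
--     root = "".join(char for char in symbol.upper() if char.isalpha())
--     if root in {"RB", "HC", "I", "J", "JM", "SF", "SM"}:
--         return "ferrous"
--     if root in {"RU", "NR", "BR"}:
--         return "rubber"
--     if root in {"SC", "FU", "TA", "EG", "MA", "PP", "L", "V"}:
--         return "energy"
--     if root in {"CU", "AL", "ZN", "NI", "SN", "PB"}:
--         return "nonferrous"
--     if root in {"M", "Y", "P", "C", "A", "CF", "SR"}: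
--         return "agriculture"
--     return "unknown"
-- ===== SOURCE B (Python) =====
-- def symbol_sector(symbol: str) -> str:
--     # Character-level decision tree (a hand-rolled trie): dispatch on the root's
--     # length, then on its first and second letters, instead of whole-string
--     # set membership tests.
--     root = [char for char in symbol.upper() if char.isalpha()]
--     if len(root) == 1:
--         c = root[0]
--         if c == "I" or c == "J":
--             return "ferrous"
--         if c == "L" or c == "V":
--             return "energy"
--         if c == "M" or c == "Y" or c == "P" or c == "C" or c == "A":
--             return "agriculture"
--         return "unknown"
--     if len(root) != 2:
--         return "unknown"
--     a, b = root
--     if a == "A":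
--         return "nonferrous" if b == "L" else "unknown"
--     if a == "B":
--         return "rubber" if b == "R" else "unknown"
--     if a == "C":
--         if b == "F":
--             return "agriculture"
--         if b == "U":
--             return "nonferrous"
--         return "unknown"
--     if a == "E":
--         return "energy" if b == "G" else "unknown"
--     if a == "F":
--         return "energy" if b == "U" else "unknown"
--     if a == "H":
--         return "ferrous" if b == "C" else "unknown"
--     if a == "J":
--         return "ferrous" if b == "M" else "unknown"
--     if a == "M":
--         return "energy" if b == "A" else "unknown"
--     if a == "N":
--         if b == "R":
--             return "rubber"
--         if b == "I":
--             return "nonferrous"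
--         return "unknown"
--     if a == "P":
--         if b == "B":
--             return "nonferrous"
--         if b == "P":
--             return "energy"
--         return "unknown"
--     if a == "R":
--         if b == "B":
--             return "ferrous"
--         if b == "U":
--             return "rubber"
--         return "unknown"
--     if a == "S":
--         if b == "F" or b == "M":
--             return "ferrous"
--         if b == "C":
--             return "energy"
--         if b == "N":
--             return "nonferrous"
--         if b == "R":
--             return "agriculture"
--         return "unknown"
--     if a == "T":
--         return "energy" if b == "A" else "unknown"
--     if a == "Z":
--         return "nonferrous" if b == "N" else "unknown"
--     return "unknown"
-- ===== Notes on version B (the rewrite author's own statement) =====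
-- stated objective: alternative
-- what changed: Replaces A's chain of five whole-string set-membership tests with a hand-rolled trie: dispatch on the root's length, then a character-level decision tree on its first and second letters, never comparing whole strings.
import Mathlib
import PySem

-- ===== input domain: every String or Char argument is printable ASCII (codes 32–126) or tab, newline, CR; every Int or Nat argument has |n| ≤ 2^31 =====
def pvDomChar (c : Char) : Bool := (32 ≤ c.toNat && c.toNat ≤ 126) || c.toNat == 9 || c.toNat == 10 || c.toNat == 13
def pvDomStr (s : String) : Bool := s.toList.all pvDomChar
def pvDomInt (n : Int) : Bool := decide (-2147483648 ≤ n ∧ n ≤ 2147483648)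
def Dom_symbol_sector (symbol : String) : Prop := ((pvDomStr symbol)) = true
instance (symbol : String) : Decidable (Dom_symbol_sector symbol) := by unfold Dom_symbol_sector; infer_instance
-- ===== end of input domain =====

-- B replaces A's chain of whole-string set-membership tests by a character-level
-- decision tree (a hand-rolled trie): dispatch on the root's length, then its
-- first and second letters (alternative decomposition, same cost).

-- ===== PORT A =====
-- root = "".join(char for char in symbol.upper() if char.isalpha()); then five ordered set-membership branches
def symbol_sector (symbol : String) : String :=
  let root : String := String.ofList ((PySem.Chars.upper symbol.toList).filter PySem.Chars.isalpha)
  if (PySem.Set.ofList ["RB", "HC", "I", "J", "JM", "SF", "SM"]).contains root then "ferrous"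
  else if (PySem.Set.ofList ["RU", "NR", "BR"]).contains root then "rubber"
  else if (PySem.Set.ofList ["SC", "FU", "TA", "EG", "MA", "PP", "L", "V"]).contains root then "energy"
  else if (PySem.Set.ofList ["CU", "AL", "ZN", "NI", "SN", "PB"]).contains root then "nonferrous"
  else if (PySem.Set.ofList ["M", "Y", "P", "C", "A", "CF", "SR"]).contains root then "agriculture"
  else "unknown"

-- ===== PORT B =====
-- the len(root) == 1 branch of Source B: dispatch on the single letter c
def classify1 (c : Char) : String :=
  if c == 'I' || c == 'J' then "ferrous"
  else if c == 'L' || c == 'V' then "energy"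
  else if c == 'M' || c == 'Y' || c == 'P' || c == 'C' || c == 'A' then "agriculture"
  else "unknown"

-- the len(root) == 2 branch of Source B: dispatch on the first letter a, then the second letter b
def classify2 (a b : Char) : String :=
  if a == 'A' then (if b == 'L' then "nonferrous" else "unknown")
  else if a == 'B' then (if b == 'R' then "rubber" else "unknown")
  else if a == 'C' then
    (if b == 'F' then "agriculture" else if b == 'U' then "nonferrous" else "unknown")
  else if a == 'E' then (if b == 'G' then "energy" else "unknown")
  else if a == 'F' then (if b == 'U' then "energy" else "unknown")
  else if a == 'H' then (if b == 'C' then "ferrous" else "unknown")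
  else if a == 'J' then (if b == 'M' then "ferrous" else "unknown")
  else if a == 'M' then (if b == 'A' then "energy" else "unknown")
  else if a == 'N' then
    (if b == 'R' then "rubber" else if b == 'I' then "nonferrous" else "unknown")
  else if a == 'P' then
    (if b == 'B' then "nonferrous" else if b == 'P' then "energy" else "unknown")
  else if a == 'R' then
    (if b == 'B' then "ferrous" else if b == 'U' then "rubber" else "unknown")
  else if a == 'S' then
    (if b == 'F' || b == 'M' then "ferrous"
     else if b == 'C' then "energy"
     else if b == 'N' then "nonferrous"
     else if b == 'R' then "agriculture"
     else "unknown")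
  else if a == 'T' then (if b == 'A' then "energy" else "unknown")
  else if a == 'Z' then (if b == 'N' then "nonferrous" else "unknown")
  else "unknown"

-- root as a char list; len dispatch + tuple unpacking of Source B becomes the shape match
def symbol_sector_alt (symbol : String) : String :=
  let root : List Char := (PySem.Chars.upper symbol.toList).filter PySem.Chars.isalpha
  match root with
  | [c] => classify1 c
  | [a, b] => classify2 a b
  | _ => "unknown"

-- ===== PRECONDITION & SPEC =====
def Spec_symbol_sector (symbol : String) (out : String) : Prop := out = symbol_sector_alt symbol
instance (symbol : String) (out : String) : Decidable (Spec_symbol_sector symbol out) := by unfold Spec_symbol_sector; infer_instance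

-- ===== CLAIM (what is proved, stated in full; the proofs are below) =====
def Claim_equal_symbol_sector : Prop := ∀ (symbol : String), Dom_symbol_sector symbol → Spec_symbol_sector symbol (symbol_sector symbol)

-- ===== LEMMAS AND PROOFS =====

theorem ofList_eq_iff (l : List Char) (s : String) : (String.ofList l = s) ↔ (l = s.toList) := by
  constructor
  · intro h; subst h; simp
  · intro h; subst h; simp

-- A's branch chain, viewed as a function of the root char list, equals B's decision tree
set_option maxHeartbeats 2000000 in
theorem chain_eq_tree (l : List Char) :
    (if (PySem.Set.ofList ["RB", "HC", "I", "J", "JM", "SF", "SM"]).contains (String.ofList l) then "ferrous"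
     else if (PySem.Set.ofList ["RU", "NR", "BR"]).contains (String.ofList l) then "rubber"
     else if (PySem.Set.ofList ["SC", "FU", "TA", "EG", "MA", "PP", "L", "V"]).contains (String.ofList l) then "energy"
     else if (PySem.Set.ofList ["CU", "AL", "ZN", "NI", "SN", "PB"]).contains (String.ofList l) then "nonferrous"
     else if (PySem.Set.ofList ["M", "Y", "P", "C", "A", "CF", "SR"]).contains (String.ofList l) then "agriculture"
     else "unknown") =
    (match l with
     | [c] => classify1 c
     | [a, b] => classify2 a b
     | _ => "unknown") := by
  match l with
  | [] => decide
  | [c] =>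
    by_cases hc : c ∈ (['I', 'J', 'L', 'V', 'M', 'Y', 'P', 'C', 'A'] : List Char)
    · simp only [List.mem_cons, List.not_mem_nil, or_false] at hc
      rcases hc with h|h|h|h|h|h|h|h|h <;> subst h <;> decide
    · simp only [List.mem_cons, List.not_mem_nil, or_false, not_or] at hc
      obtain ⟨h1, h2, h3, h4, h5, h6, h7, h8, h9⟩ := hc
      simp [classify1, PySem.Set.contains, PySem.Set.ofList, PySem.Set.add, PySem.Set.empty,
        ofList_eq_iff, h1, h2, h3, h4, h5, h6, h7, h8, h9]
  | [a, b] =>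
    by_cases ha : a ∈ (['A', 'B', 'C', 'E', 'F', 'H', 'J', 'M', 'N', 'P', 'R', 'S', 'T', 'Z'] : List Char)
    · simp only [List.mem_cons, List.not_mem_nil, or_false] at ha
      rcases ha with h|h|h|h|h|h|h|h|h|h|h|h|h|h <;> subst h <;>
        (by_cases hb : b ∈ (['L', 'R', 'F', 'U', 'G', 'C', 'M', 'A', 'B', 'P', 'N', 'I'] : List Char)
         · simp only [List.mem_cons, List.not_mem_nil, or_false] at hb
           rcases hb with h'|h'|h'|h'|h'|h'|h'|h'|h'|h'|h'|h' <;> subst h' <;> decide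
         · simp only [List.mem_cons, List.not_mem_nil, or_false, not_or] at hb
           obtain ⟨g1, g2, g3, g4, g5, g6, g7, g8, g9, g10, g11, g12⟩ := hb
           simp [classify2, PySem.Set.contains, PySem.Set.ofList, PySem.Set.add, PySem.Set.empty,
             ofList_eq_iff, g1, g2, g3, g4, g5, g6, g7, g8, g9, g10, g11, g12])
    · simp only [List.mem_cons, List.not_mem_nil, or_false, not_or] at ha
      obtain ⟨f1, f2, f3, f4, f5, f6, f7, f8, f9, f10, f11, f12, f13, f14⟩ := ha
      simp [classify2, PySem.Set.contains, PySem.Set.ofList, PySem.Set.add, PySem.Set.empty,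
        ofList_eq_iff, f1, f2, f3, f4, f5, f6, f7, f8, f9, f10, f11, f12, f13, f14]
  | a :: b :: c :: rest =>
    simp [PySem.Set.contains, PySem.Set.ofList, PySem.Set.add, PySem.Set.empty, ofList_eq_iff]

-- ===== VERDICT (by name: the statement is the Claim_ definition above) =====
theorem symbol_sector_spec : Claim_equal_symbol_sector := by
  intro symbol _
  unfold Spec_symbol_sector symbol_sector symbol_sector_alt
  exact chain_eq_tree _
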